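-- pv_equiv track=rewrite | github.com/all-of-us/raw-data-repository | rdr_service/rdr_client/check_ppi_data.py | _convert_csv_column_to_dict
-- ===== SOURCE A (Python) =====
-- def _convert_csv_column_to_dict(csv_data, column):
--   """
--   Return a dictionary object with keys from the first column and values from the specified
--   column.
--   :param csv_data: File-like CSV text downloaded from Google spreadsheets. (See main doc.)
--   :return: dict of fields and values for given column
--   """
--   results = dict()
--
--   for row in csv_data:
--     key = row[0]
--     data = row[1:][column]
--
--     if data:
--       if key not in results:
--         results[key] = data.strip() if data else ''
--       else:
--         # append multiple choice questions
--         results[key] += '|{0}'.format(data.strip())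
--
--   return results
-- ===== SOURCE B (Python) =====
-- def _convert_csv_column_to_dict(csv_data, column):
--   """Staged passes instead of one dict-building loop: flatten rows to (key, data)
--   pairs, list the keys by first truthy occurrence, then build each value by
--   rescanning the pairs and '|'-joining the stripped truthy data for that key."""
--   pairs = [(row[0], row[1:][column]) for row in csv_data]
--   keys = []
--   for k, d in pairs:
--     if d and k not in keys:
--       keys.append(k)
--   return {k: '|'.join(d.strip() for kk, d in pairs if kk == k and d) for k in keys}
-- ===== Notes on version B (the rewrite author's own statement) =====
-- stated objective: alternative
-- what changed: Replaces A's single loop that builds a dict by conditional insert / incremental '|'-concatenation with staged passes: flatten rows to (key, data) pairs, collect the keys in first-truthy-occurrence order, then build each value by rescanning the pairs and '|'-joining the stripped truthy data for that key; trades A's one-pass dict mutation for an extra per-key scan.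
import Mathlib
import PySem

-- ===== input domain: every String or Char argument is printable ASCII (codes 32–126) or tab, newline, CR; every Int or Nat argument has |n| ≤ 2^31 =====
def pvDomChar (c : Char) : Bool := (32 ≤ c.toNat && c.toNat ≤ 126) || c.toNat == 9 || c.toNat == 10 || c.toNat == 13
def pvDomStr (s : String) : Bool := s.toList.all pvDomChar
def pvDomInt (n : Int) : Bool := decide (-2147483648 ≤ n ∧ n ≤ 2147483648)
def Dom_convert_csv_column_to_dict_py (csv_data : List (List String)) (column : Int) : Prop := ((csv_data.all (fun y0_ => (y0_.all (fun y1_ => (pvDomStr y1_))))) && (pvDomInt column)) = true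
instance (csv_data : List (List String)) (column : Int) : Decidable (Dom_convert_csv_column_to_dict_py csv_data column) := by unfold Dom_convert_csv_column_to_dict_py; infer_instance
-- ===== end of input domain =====

-- B replaces A's single dict-building loop with incremental string concatenation by staged passes:
-- flatten to (key, data) pairs, collect first-occurrence keys, then '|'-join per key by rescanning
-- (return value only; neither mutates its arguments).

-- ===== PORT A =====
-- Python str concatenation a + b, exact: strings are their code-point lists.
def pvCat (a b : String) : String := String.ofList (a.toList ++ b.toList)

-- loop body of A: key = row[0]; data = row[1:][column]; if data: insert stripped / append '|'-prefixed
def pvStepA (column : Int) (results : PySem.Dict String String) (row : List String) : PySem.Dict String String :=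
  let key := PySem.List.pyGetD row 0 ""
  let data := PySem.List.pyGetD (PySem.List.slice row (some 1) none) column ""
  if data ≠ "" then
    if ¬ (results.contains key) then
      results.insert key (if data ≠ "" then PySem.Str.strip data else "")
    else
      results.insert key (pvCat (results.getD key "") (pvCat "|" (PySem.Str.strip data)))
  else results

def convert_csv_column_to_dict_py (csv_data : List (List String)) (column : Int) : List (String × String) :=
  (csv_data.foldl (pvStepA column) PySem.Dict.empty).items

-- ===== PORT B =====
-- pairs = [(row[0], row[1:][column]) for row in csv_data]
-- keys  = first-occurrence order of keys of truthy pairs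
-- result: per key, '|'-join of the stripped truthy data found by rescanning pairs
def convert_csv_column_to_dict_py_alt (csv_data : List (List String)) (column : Int) : List (String × String) :=
  let pairs := csv_data.map (fun row => (PySem.List.pyGetD row 0 "", PySem.List.pyGetD (PySem.List.slice row (some 1) none) column ""))
  let keys := pairs.foldl (fun ks p => if p.2 ≠ "" ∧ p.1 ∉ ks then ks ++ [p.1] else ks) []
  keys.map (fun k => (k, PySem.Str.join "|" ((pairs.filter (fun p => p.1 == k && p.2 != "")).map (fun p => PySem.Str.strip p.2))))

-- ===== PRECONDITION & SPEC =====
-- Pre_ excludes exactly the inputs where Python A raises IndexError: an empty row (row[0]) or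
-- column out of range for the slice row[1:].
def Pre_convert_csv_column_to_dict_py (csv_data : List (List String)) (column : Int) : Prop :=
  ∀ row ∈ csv_data, row ≠ [] ∧ PySem.Raise.InRange (row.length - 1) column
instance (csv_data : List (List String)) (column : Int) : Decidable (Pre_convert_csv_column_to_dict_py csv_data column) := by unfold Pre_convert_csv_column_to_dict_py; infer_instance
def pvWitness_convert_csv_column_to_dict_py : List (List String) × Int := ([["k", "v1"], ["k", " v2 "]], 0)

def Spec_convert_csv_column_to_dict_py (csv_data : List (List String)) (column : Int) (out : List (String × String)) : Prop := out = convert_csv_column_to_dict_py_alt csv_data column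
instance (csv_data : List (List String)) (column : Int) (out : List (String × String)) : Decidable (Spec_convert_csv_column_to_dict_py csv_data column out) := by unfold Spec_convert_csv_column_to_dict_py; infer_instance

-- ===== CLAIM (what is proved, stated in full; the proofs are below) =====
def Claim_equal_convert_csv_column_to_dict_py : Prop := ∀ (csv_data : List (List String)) (column : Int), Dom_convert_csv_column_to_dict_py csv_data column → Pre_convert_csv_column_to_dict_py csv_data column → Spec_convert_csv_column_to_dict_py csv_data column (convert_csv_column_to_dict_py csv_data column)

-- ===== LEMMAS AND PROOFS =====

-- the '|'-join of one more chunk, for a nonempty list of chunks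
theorem pvChars_join_append (sep : List Char) (l : List (List Char)) (c : List Char) (h : l ≠ []) :
    PySem.Chars.join sep (l ++ [c]) = PySem.Chars.join sep l ++ sep ++ c := by
  induction l with
  | nil => exact absurd rfl h
  | cons p rest ih =>
    cases rest with
    | nil => simp [PySem.Chars.join_singleton, PySem.Chars.join_cons_cons]
    | cons q r =>
      rw [show (p :: q :: r) ++ [c] = p :: q :: (r ++ [c]) by simp,
        PySem.Chars.join_cons_cons sep p q (r ++ [c]),
        PySem.Chars.join_cons_cons sep p q r,
        show q :: (r ++ [c]) = (q :: r) ++ [c] by simp, ih (by simp)]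
      simp

-- proof-side intermediate: the grouping dict (lists of stripped truthy values per key)
def pvStepB (column : Int) (groups : PySem.Dict String (List String)) (row : List String) : PySem.Dict String (List String) :=
  let data := PySem.List.pyGetD (PySem.List.slice row (some 1) none) column ""
  if data ≠ "" then
    groups.modify (PySem.List.pyGetD row 0 "") [] (· ++ [PySem.Str.strip data])
  else groups

-- A's dict is the grouping dict with every value '|'-joined
def pvMapJoin (d : PySem.Dict String (List String)) : PySem.Dict String String :=
  PySem.Dict.mk (d.items.map (fun p => (p.1, PySem.Str.join "|" p.2)))

theorem pvMapJoin_keys (d : PySem.Dict String (List String)) : (pvMapJoin d).keys = d.keys := by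
  simp [pvMapJoin, PySem.Dict.keys]

theorem pvStr_join_append (v : List String) (s : String) (h : v ≠ []) :
    PySem.Str.join "|" (v ++ [s]) = pvCat (PySem.Str.join "|" v) (pvCat "|" s) := by
  unfold PySem.Str.join pvCat
  rw [List.map_append, List.map_singleton,
    pvChars_join_append _ _ _ (by simpa using h)]
  simp

theorem pvMapJoin_contains (d : PySem.Dict String (List String)) (k : String) :
    (pvMapJoin d).contains k = d.contains k := by
  rw [PySem.Dict.contains_eq_decide_mem_keys, PySem.Dict.contains_eq_decide_mem_keys,
    pvMapJoin_keys]

theorem pvStep_comm (column : Int) (row : List String) (d : PySem.Dict String (List String))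
    (hnd : d.keys.Nodup) (hne : ∀ p ∈ d.items, p.2 ≠ []) :
    pvStepA column (pvMapJoin d) row = pvMapJoin (pvStepB column d row) := by
  unfold pvStepA pvStepB PySem.Dict.modify
  dsimp only
  by_cases hdata : PySem.List.pyGetD (PySem.List.slice row (some 1) none) column "" = ""
  · simp [hdata]
  · simp only [hdata, ne_eq, not_false_eq_true, if_true, ite_not,
      pvMapJoin_contains]
    by_cases hk : d.contains (PySem.List.pyGetD row 0 "") = true
    · -- key already present: A appends '|'-prefixed, B appends to the group list
      simp only [hk, if_true]
      obtain ⟨v, hv⟩ : ∃ v, d.get? (PySem.List.pyGetD row 0 "") = some v := by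
        rw [PySem.Dict.contains_eq_isSome_get?] at hk
        exact Option.isSome_iff_exists.mp hk
      have hvne : v ≠ [] := hne _ (PySem.Dict.mem_items_of_get?_eq_some d hv)
      have hgd : d.getD (PySem.List.pyGetD row 0 "") [] = v :=
        PySem.Dict.getD_of_get?_eq_some d [] hv
      have hgdj : (pvMapJoin d).getD (PySem.List.pyGetD row 0 "") "" = PySem.Str.join "|" v := by
        refine PySem.Dict.getD_of_mem_items (pvMapJoin d) ?_ ?_ ""
        · exact List.mem_map.mpr ⟨_, PySem.Dict.mem_items_of_get?_eq_some d hv, rfl⟩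
        · rw [pvMapJoin_keys]; exact hnd
      apply PySem.Dict.ext
      rw [PySem.Dict.items_insert_of_contains _ _ (by rw [pvMapJoin_contains]; exact hk),
        hgdj, hgd]
      show List.map _ (List.map _ d.items) =
        (PySem.Dict.mk (List.map _ (PySem.Dict.insert d _ _).items)).items
      rw [PySem.Dict.items_insert_of_contains _ _ hk]
      show _ = List.map _ (List.map _ d.items)
      rw [List.map_map, List.map_map]
      refine List.map_congr_left (fun p hp => ?_)
      by_cases hpk : p.1 = PySem.List.pyGetD row 0 ""
      · simp only [Function.comp, hpk, beq_self_eq_true, if_true]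
        rw [pvStr_join_append v _ hvne]
      · simp only [Function.comp, beq_iff_eq, hpk, if_false]
    · -- fresh key: A inserts the stripped value, B starts the group [stripped]
      simp only [hk, Bool.false_eq_true, if_false,
        PySem.Dict.getD_of_not_contains d [] (by simpa using hk), List.nil_append]
      apply PySem.Dict.ext
      rw [PySem.Dict.items_insert_of_not_contains _ _ (by rw [pvMapJoin_contains]; simpa using hk)]
      show (pvMapJoin d).items ++ _ =
        (PySem.Dict.mk (List.map _ (PySem.Dict.insert d _ _).items)).items
      rw [PySem.Dict.items_insert_of_not_contains _ _ (by simpa using hk)]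
      show _ = List.map _ (d.items ++ _)
      rw [List.map_append]
      simp [pvMapJoin, PySem.Str.join, PySem.Str.strip, PySem.Chars.join_singleton]

theorem pvStepB_nodup (column : Int) (row : List String) (d : PySem.Dict String (List String))
    (hnd : d.keys.Nodup) : (pvStepB column d row).keys.Nodup := by
  unfold pvStepB PySem.Dict.modify
  dsimp only
  split
  · exact PySem.Dict.nodup_keys_insert d _ _ hnd
  · exact hnd

theorem pvStepB_ne (column : Int) (row : List String) (d : PySem.Dict String (List String))
    (hne : ∀ p ∈ d.items, p.2 ≠ []) : ∀ p ∈ (pvStepB column d row).items, p.2 ≠ [] := by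
  unfold pvStepB PySem.Dict.modify
  dsimp only
  split
  · intro p hp
    rcases (PySem.Dict.mem_items_insert _ _ _ _).mp hp with h | h
    · subst h; simp
    · exact hne p h.1
  · exact hne

theorem pvInv (column : Int) (l : List (List String)) (d : PySem.Dict String (List String))
    (hnd : d.keys.Nodup) (hne : ∀ p ∈ d.items, p.2 ≠ []) :
    l.foldl (pvStepA column) (pvMapJoin d) = pvMapJoin (l.foldl (pvStepB column) d) := by
  induction l generalizing d with
  | nil => rfl
  | cons row t ih =>
    rw [List.foldl_cons, List.foldl_cons, pvStep_comm column row d hnd hne,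
      ih _ (pvStepB_nodup column row d hnd) (pvStepB_ne column row d hne)]

-- the (key, data) pair of a row, as B computes it
def pvPair (column : Int) (row : List String) : String × String :=
  (PySem.List.pyGetD row 0 "", PySem.List.pyGetD (PySem.List.slice row (some 1) none) column "")

-- the truthy pairs, stripped: what the grouping dict is fed
def pvTP (column : Int) (csv_data : List (List String)) : List (String × String) :=
  ((csv_data.map (pvPair column)).filter (fun p => p.2 != "")).map (fun p => (p.1, PySem.Str.strip p.2))

-- the grouping fold over rows IS a plain modify-append fold over the truthy stripped pairs
theorem pvGroups_eq (column : Int) (l : List (List String)) (d : PySem.Dict String (List String)) :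
    l.foldl (pvStepB column) d
      = (pvTP column l).foldl (fun d p => d.modify p.1 [] (· ++ [p.2])) d := by
  induction l generalizing d with
  | nil => rfl
  | cons row t ih =>
    rw [List.foldl_cons, ih]
    unfold pvTP pvStepB pvPair
    dsimp only
    by_cases hdata : PySem.List.pyGetD (PySem.List.slice row (some 1) none) column "" = ""
    · simp [hdata]
    · simp [hdata]

-- B's key-collecting fold is Set.update with the truthy keys
theorem pvKeys_eq (ps : List (String × String)) (ks : List String) :
    ps.foldl (fun ks p => if p.2 ≠ "" ∧ p.1 ∉ ks then ks ++ [p.1] else ks) ks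
      = PySem.Set.update ks ((ps.filter (fun p => p.2 != "")).map (fun p => p.1)) := by
  induction ps generalizing ks with
  | nil => rfl
  | cons p t ih =>
    by_cases hdata : p.2 = ""
    · simp [hdata, ih]
    · rw [List.foldl_cons, ih]
      have : PySem.Set.update ks (((p :: t).filter (fun p => p.2 != "")).map (fun p => p.1))
          = PySem.Set.update (PySem.Set.add ks p.1) ((t.filter (fun p => p.2 != "")).map (fun p => p.1)) := by
        simp [hdata, PySem.Set.update]
      rw [this]
      congr 1
      by_cases hmem : p.1 ∈ ks
      · simp [hdata, hmem, PySem.Set.add]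
      · simp [hdata, hmem, PySem.Set.add]

-- B's per-key rescan equals the filtered projection of the truthy stripped pairs
theorem pvVals_eq (column : Int) (csv_data : List (List String)) (k : String) :
    ((pvTP column csv_data).filter (fun p => p.1 == k)).map (fun p => p.2)
      = (((csv_data.map (pvPair column)).filter (fun p => p.1 == k && p.2 != "")).map (fun p => PySem.Str.strip p.2)) := by
  unfold pvTP
  rw [List.filter_map, List.filter_filter, List.map_map]
  simp [Function.comp_def]

-- ===== VERDICT (by name: the statement is the Claim_ definition above) =====
theorem convert_csv_column_to_dict_py_spec : Claim_equal_convert_csv_column_to_dict_py := by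
  intro csv_data column _ _
  unfold Spec_convert_csv_column_to_dict_py convert_csv_column_to_dict_py
  have halt : convert_csv_column_to_dict_py_alt csv_data column
      = ((csv_data.map (pvPair column)).foldl (fun ks p => if p.2 ≠ "" ∧ p.1 ∉ ks then ks ++ [p.1] else ks) []).map
          (fun k => (k, PySem.Str.join "|" (((csv_data.map (pvPair column)).filter (fun p => p.1 == k && p.2 != "")).map (fun p => PySem.Str.strip p.2)))) := rfl
  rw [halt]
  have h0 : (PySem.Dict.empty : PySem.Dict String String) = pvMapJoin PySem.Dict.empty := by
    simp [pvMapJoin, PySem.Dict.empty]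
  rw [h0, pvInv column csv_data PySem.Dict.empty (by simp) (by simp [PySem.Dict.empty]),
    pvGroups_eq]
  -- the grouping dict in its modify-append form
  set tps := pvTP column csv_data with htps
  have hnd : ((tps.foldl (fun d p => d.modify p.1 [] (· ++ [p.2])) PySem.Dict.empty)).keys.Nodup :=
    PySem.Dict.nodup_keys_foldl_modify_key tps Prod.fst [] _ PySem.Dict.empty (by simp)
  have hkeys : ((tps.foldl (fun d p => d.modify p.1 [] (· ++ [p.2])) PySem.Dict.empty)).keys
      = PySem.Set.update [] (tps.map Prod.fst) := by
    simpa using PySem.Dict.keys_foldl_modify_key tps Prod.fst [] _ PySem.Dict.empty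
  have hitems := PySem.Dict.items_eq_map_keys
    (tps.foldl (fun d p => d.modify p.1 [] (· ++ [p.2])) PySem.Dict.empty) hnd []
  rw [show (pvMapJoin (tps.foldl (fun d p => d.modify p.1 [] (· ++ [p.2])) PySem.Dict.empty)).items
      = ((tps.foldl (fun d p => d.modify p.1 [] (· ++ [p.2])) PySem.Dict.empty)).items.map
        (fun p => (p.1, PySem.Str.join "|" p.2)) from rfl,
    hitems, hkeys, List.map_map]
  rw [pvKeys_eq]
  have hkl : (((csv_data.map (pvPair column)).filter (fun p => p.2 != "")).map (fun p => p.1))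
      = tps.map Prod.fst := by
    rw [htps]; unfold pvTP; rw [List.map_map]; rfl
  rw [hkl]
  refine List.map_congr_left (fun k _ => ?_)
  simp only [Function.comp]
  congr 1
  rw [PySem.Dict.getD_foldl_modify_append, PySem.Dict.getD_empty, List.nil_append,
    ← pvVals_eq column csv_data k]
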